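-- pv_equiv track=rewrite | github.com/AdamZhouSE/pythonHomework | Code/CodeRecords/2417/60739/255456.py | good_nums
-- ===== SOURCE A (Python) =====
-- def good_nums(nums):
--     nums.sort()
--     if nums[0] == 1:
--         return True
--     else:
--         for i in range(2, nums[0] + 1):
--             remain = 0
--             for num in nums:
--                 remain += num % i
--             if remain == 0:
--                 return False
--         return True
-- ===== SOURCE B (Python) =====
-- def _gcd(a, b):
--     while b:
--         a, b = b, a % b
--     return a
--
--
-- def good_nums(nums):
--     nums.sort()
--     if nums[0] < 2:
--         return True
--     g = nums[0]
--     for num in nums: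
--         g = _gcd(g, num)
--         if g == 1:
--             return True
--     return False
-- ===== Notes on version B (the rewrite author's own statement) =====
-- stated objective: alternative
-- what changed: A trial-divides every candidate i in [2, min(nums)] against the whole list; B sorts the same way but computes a single running gcd (hand-rolled Euclid) over the list with early exit at gcd 1, answering True iff the gcd is 1 (or the smallest element rules the loop out); the candidate scan disappears.
import Mathlib
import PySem

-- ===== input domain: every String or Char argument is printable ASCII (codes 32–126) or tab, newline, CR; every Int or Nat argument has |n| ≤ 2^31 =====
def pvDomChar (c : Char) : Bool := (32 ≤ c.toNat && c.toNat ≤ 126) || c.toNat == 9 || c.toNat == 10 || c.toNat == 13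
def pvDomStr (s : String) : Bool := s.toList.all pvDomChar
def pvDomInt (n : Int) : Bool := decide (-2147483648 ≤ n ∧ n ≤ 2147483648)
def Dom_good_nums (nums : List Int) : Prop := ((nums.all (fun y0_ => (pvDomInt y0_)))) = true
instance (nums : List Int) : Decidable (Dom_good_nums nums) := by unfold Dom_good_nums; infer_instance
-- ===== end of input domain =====

-- B replaces A's trial division over every candidate i in [2, min(nums)] by a single
-- gcd fold (hand-rolled Euclid) over the sorted list with early exit at gcd 1.
-- Both Pythons sort nums in place; the equivalence proved here is about the RETURN value.

-- ===== PORT A =====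
-- the body of the 'for i in range(...)' loop: 'remain = 0; for num in nums: remain += num % i; if remain == 0: return False'
def aLoop (s : List Int) : List Int → Bool
  | [] => true
  | i :: rest =>
    if s.foldl (fun acc num => acc + PySem.Int.mod num i) 0 = 0 then false
    else aLoop s rest

def good_nums (nums : List Int) : Bool :=
  let s := PySem.List.sorted nums (fun x => x) false
  match s with
  | [] => false   -- unreachable under Pre_ (Python raises IndexError reading the first element of the empty list)
  | m :: _ =>
    if m = 1 then true
    else aLoop s (PySem.List.pyRange 2 (m + 1) 1)

-- ===== PORT B =====
-- helper _gcd: 'while b: a, b = b, a % b; return a'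
def pyGcd (a b : Int) : Int :=
  if _h : b = 0 then a else pyGcd b (PySem.Int.mod a b)
termination_by b.natAbs
decreasing_by
  rcases lt_or_gt_of_ne _h with hb | hb
  · have h1 := (PySem.Int.mod_neg_bounds a hb).1
    have h2 := (PySem.Int.mod_neg_bounds a hb).2
    omega
  · have h1 := PySem.Int.mod_nonneg a hb
    have h2 := PySem.Int.mod_lt a hb
    omega

-- 'for num in nums: g = _gcd(g, num); if g == 1: return True' then 'return False'
def gcdFold (g : Int) : List Int → Bool
  | [] => false
  | num :: rest =>
    let g' := pyGcd g num
    if g' = 1 then true else gcdFold g' rest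

def good_nums_alt (nums : List Int) : Bool :=
  let s := PySem.List.sorted nums (fun x => x) false
  match s with
  | [] => false   -- unreachable under Pre_ (Python raises IndexError reading the first element of the empty list)
  | m :: _ =>
    if m < 2 then true
    else gcdFold m s

-- ===== PRECONDITION & SPEC =====
-- Pre_ excludes only the empty list, on which both Pythons raise IndexError reading the first element.
def Pre_good_nums (nums : List Int) : Prop := nums ≠ []
instance (nums : List Int) : Decidable (Pre_good_nums nums) := by unfold Pre_good_nums; infer_instance
def pvWitness_good_nums : List Int := [6, 4, 3]

def Spec_good_nums (nums : List Int) (out : Bool) : Prop := out = good_nums_alt nums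
instance (nums : List Int) (out : Bool) : Decidable (Spec_good_nums nums out) := by unfold Spec_good_nums; infer_instance

-- ===== CLAIM (what is proved, stated in full; the proofs are below) =====
def Claim_equal_good_nums : Prop := ∀ (nums : List Int), Dom_good_nums nums → Pre_good_nums nums → Spec_good_nums nums (good_nums nums)

-- ===== LEMMAS AND PROOFS =====

-- the gcd fold B performs, re-expressed with Mathlib's Int.gcd (proof vocabulary only)
def gfold (a : Int) (l : List Int) : Int := l.foldl (fun a x => ((Int.gcd a x : Nat) : Int)) a

theorem pyGcd_eq_gcd (a b : Int) : 0 ≤ a → 0 ≤ b → pyGcd a b = ((Int.gcd a b : Nat) : Int) := by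
  induction a, b using pyGcd.induct with
  | case1 a =>
    intro ha _
    rw [pyGcd]
    simp [Int.natAbs_of_nonneg ha]
  | case2 a b h ih =>
    intro ha hb
    have hbpos : 0 < b := lt_of_le_of_ne hb (Ne.symm h)
    rw [pyGcd]
    simp only [h, dite_false]
    rw [ih hb (PySem.Int.mod_nonneg a hbpos)]
    rw [PySem.Int.mod_eq_emod_of_pos hbpos, Int.gcd_comm b, Int.gcd_emod]

theorem foldl_mod_zero (i : Int) (hi : 0 < i) (s : List Int) :
    ∀ c : Int, 0 ≤ c →
      ((s.foldl (fun acc num => acc + PySem.Int.mod num i) c = 0) ↔ (c = 0 ∧ ∀ x ∈ s, i ∣ x)) := by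
  induction s with
  | nil => intro c hc; simp
  | cons x t ih =>
    intro c hc
    have hm0 : 0 ≤ PySem.Int.mod x i := PySem.Int.mod_nonneg x hi
    have := ih (c + PySem.Int.mod x i) (by omega)
    simp only [List.foldl_cons]
    rw [this]
    constructor
    · rintro ⟨h1, h2⟩
      have hmz : PySem.Int.mod x i = 0 := by omega
      exact ⟨by omega, by
        intro y hy
        rw [List.mem_cons] at hy
        rcases hy with rfl | hy
        · exact (PySem.Int.mod_eq_zero_iff_dvd _ i).mp hmz
        · exact h2 y hy⟩
    · rintro ⟨h1, h2⟩
      have hmz : PySem.Int.mod x i = 0 :=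
        (PySem.Int.mod_eq_zero_iff_dvd x i).mpr (h2 x (List.mem_cons_self ..))
      exact ⟨by omega, fun y hy => h2 y (List.mem_cons_of_mem _ hy)⟩

theorem aLoop_eq_true_iff (s : List Int) (r : List Int) (hr : ∀ i ∈ r, 0 < i) :
    aLoop s r = true ↔ ∀ i ∈ r, ¬ (∀ x ∈ s, i ∣ x) := by
  induction r with
  | nil => simp [aLoop]
  | cons i rest ih =>
    have hi : 0 < i := hr i (List.mem_cons_self ..)
    rw [aLoop]
    by_cases hz : ∀ x ∈ s, i ∣ x
    · rw [if_pos ((foldl_mod_zero i hi s 0 le_rfl).mpr ⟨rfl, hz⟩)]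
      simp only [Bool.false_eq_true, false_iff, not_forall]
      exact ⟨i, List.mem_cons_self .., by simpa using hz⟩
    · rw [if_neg (fun h => hz ((foldl_mod_zero i hi s 0 le_rfl).mp h).2)]
      rw [ih (fun j hj => hr j (List.mem_cons_of_mem _ hj))]
      constructor
      · intro h j hj
        rw [List.mem_cons] at hj
        rcases hj with rfl | hj
        · exact hz
        · exact h j hj
      · intro h j hj
        exact h j (List.mem_cons_of_mem _ hj)

theorem gfold_nil (a : Int) : gfold a [] = a := rfl
theorem gfold_cons (a x : Int) (l : List Int) :
    gfold a (x :: l) = gfold ((Int.gcd a x : Nat) : Int) l := rfl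

theorem gfold_one (l : List Int) : gfold 1 l = 1 := by
  induction l with
  | nil => rfl
  | cons x t ih => rw [gfold_cons]; simpa using ih

theorem gcdFold_eq (l : List Int) : ∀ (g : Int), 0 ≤ g → g ≠ 1 → (∀ x ∈ l, 0 ≤ x) →
    gcdFold g l = decide (gfold g l = 1) := by
  induction l with
  | nil => intro g _ hg1 _; simp [gcdFold, gfold_nil, hg1]
  | cons x t ih =>
    intro g hg hg1 hl
    have hx : 0 ≤ x := hl x (List.mem_cons_self ..)
    rw [gcdFold]
    simp only [pyGcd_eq_gcd g x hg hx]
    rw [gfold_cons]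
    by_cases h1 : ((Int.gcd g x : Nat) : Int) = 1
    · simp [h1, gfold_one]
    · rw [if_neg h1, ih _ (by positivity) h1 (fun y hy => hl y (List.mem_cons_of_mem _ hy))]

theorem gfold_dvd (l : List Int) : ∀ (a : Int), gfold a l ∣ a ∧ ∀ x ∈ l, gfold a l ∣ x := by
  induction l with
  | nil => intro a; simp [gfold_nil]
  | cons x t ih =>
    intro a
    rw [gfold_cons]
    obtain ⟨h1, h2⟩ := ih ((Int.gcd a x : Nat) : Int)
    refine ⟨h1.trans (Int.gcd_dvd_left a x), ?_⟩
    intro y hy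
    rw [List.mem_cons] at hy
    rcases hy with rfl | hy
    · exact h1.trans (Int.gcd_dvd_right a y)
    · exact h2 y hy

theorem dvd_gfold (l : List Int) : ∀ (a d : Int), d ∣ a → (∀ x ∈ l, d ∣ x) → d ∣ gfold a l := by
  induction l with
  | nil => intro a d h _; simpa [gfold_nil] using h
  | cons x t ih =>
    intro a d hda hdl
    rw [gfold_cons]
    exact ih _ d (Int.dvd_coe_gcd hda (hdl x (List.mem_cons_self ..)))
      (fun y hy => hdl y (List.mem_cons_of_mem _ hy))

theorem gfold_nonneg (l : List Int) : ∀ (a : Int), 0 ≤ a → 0 ≤ gfold a l := by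
  induction l with
  | nil => intro a ha; simpa [gfold_nil] using ha
  | cons x t ih => intro a ha; rw [gfold_cons]; exact ih _ (by positivity)

theorem main_eq (nums : List Int) (hne : nums ≠ []) :
    good_nums nums = good_nums_alt nums := by
  unfold good_nums good_nums_alt
  have hsn : PySem.List.sorted nums (fun x => x) false ≠ [] := by
    rw [Ne, PySem.List.sorted_eq_nil_iff]; exact hne
  obtain ⟨m, t, hs⟩ : ∃ m t, PySem.List.sorted nums (fun x => x) false = m :: t := by
    cases h : PySem.List.sorted nums (fun x => x) false with
    | nil => exact absurd h hsn
    | cons a b => exact ⟨a, b, rfl⟩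
  simp only [hs]
  have hk := PySem.List.key_head_sorted_le (xs := nums) (key := fun x => x) hs
  have hmin : ∀ y ∈ m :: t, m ≤ y := by
    intro y hy
    rw [← hs] at hy
    exact hk y ((PySem.List.mem_sorted _ _ _ _).mp hy)
  by_cases h1 : m = 1
  · simp [h1]
  · rw [if_neg h1]
    by_cases h2 : m < 2
    · rw [if_pos h2]
      rw [PySem.List.pyRange_one_eq_nil (by omega)]
      rfl
    · rw [if_neg h2]
      have hm2 : 2 ≤ m := by omega
      have hpos : ∀ x ∈ m :: t, 0 ≤ x := fun x hx => le_trans (by omega) (hmin x hx)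
      rw [gcdFold_eq (m :: t) m (by omega) h1 hpos]
      rw [Bool.eq_iff_iff]
      rw [aLoop_eq_true_iff (m :: t) _ (fun i hi => by
        have := (PySem.List.mem_pyRange_one).mp hi; omega)]
      rw [decide_eq_true_iff]
      have hGd := gfold_dvd (m :: t) m
      have hG0 : 0 ≤ gfold m (m :: t) := gfold_nonneg (m :: t) m (by omega)
      have hGne : gfold m (m :: t) ≠ 0 := by
        intro h0
        have := hGd.1
        rw [h0] at this
        have : m = 0 := zero_dvd_iff.mp this
        omega
      constructor
      · intro hall
        by_contra hG1
        have hG2 : 2 ≤ gfold m (m :: t) := by omega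
        have hGlem : gfold m (m :: t) ≤ m := Int.le_of_dvd (by omega) hGd.1
        exact hall (gfold m (m :: t))
          ((PySem.List.mem_pyRange_one).mpr ⟨hG2, by omega⟩) hGd.2
      · intro hG1 i hi hidvd
        have hmem := (PySem.List.mem_pyRange_one).mp hi
        have : i ∣ gfold m (m :: t) :=
          dvd_gfold (m :: t) m i (hidvd m (List.mem_cons_self ..)) hidvd
        rw [hG1] at this
        have := Int.le_of_dvd one_pos this
        omega

-- ===== VERDICT (by name: the statement is the Claim_ definition above) =====
theorem good_nums_spec : Claim_equal_good_nums := by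
  intro nums _ hpre
  show good_nums nums = good_nums_alt nums
  exact main_eq nums hpre
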